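-- pv_equiv track=rewrite | github.com/kimseunghyun-kr/cs4248-team-26 | project/cbdc/prompts.py | combine_topic_rows
-- ===== SOURCE A (Python) =====
-- from typing import Sequence
--
-- def _is_redundant_phrase(phrase: str, chosen: Sequence[str]) -> bool:
--     phrase_tokens = set(phrase.split())
--     for other in chosen:
--         if phrase == other or phrase in other or other in phrase:
--             return True
--         other_tokens = set(other.split())
--         union = phrase_tokens | other_tokens
--         if union and len(phrase_tokens & other_tokens) / len(union) >= 0.8:
--             return True
--     return False
--
-- def combine_topic_rows(
--     entity_rows: Sequence[dict],
--     phrase_rows: Sequence[dict],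
--     curated_rows: Sequence[dict],
--     max_topics: int,
-- ) -> list[dict]:
--     """Prefer structured entities, then mined phrases, then curated dataset-matched rows."""
--     combined = []
--     chosen_topics = []
--
--     entity_budget = min(max_topics // 2, 12)
--     for row in entity_rows[:entity_budget]:
--         if _is_redundant_phrase(row["topic"], chosen_topics):
--             continue
--         combined.append(row)
--         chosen_topics.append(row["topic"])
--
--     curated_content_rows = [row for row in curated_rows if row.get("kind") != "style"]
--     curated_style_rows = [row for row in curated_rows if row.get("kind") == "style"]
--
--     if len(combined) < max_topics:
--         for row in curated_content_rows:
--             if _is_redundant_phrase(row["topic"], chosen_topics):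
--                 continue
--             combined.append(row)
--             chosen_topics.append(row["topic"])
--             if len(combined) >= max_topics:
--                 break
--
--     if len(combined) < max_topics:
--         for row in phrase_rows:
--             if _is_redundant_phrase(row["topic"], chosen_topics):
--                 continue
--             combined.append(row)
--             chosen_topics.append(row["topic"])
--             if len(combined) >= max_topics:
--                 break
--
--     if len(combined) < max_topics:
--         for row in curated_style_rows:
--             if _is_redundant_phrase(row["topic"], chosen_topics):
--                 continue
--             combined.append(row)
--             chosen_topics.append(row["topic"])
--             if len(combined) >= max_topics:
--                 break
--
--     if len(combined) < max_topics:
--         for row in entity_rows[entity_budget:]: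
--             if _is_redundant_phrase(row["topic"], chosen_topics):
--                 continue
--             combined.append(row)
--             chosen_topics.append(row["topic"])
--             if len(combined) >= max_topics:
--                 break
--
--     return combined[:max_topics]
-- ===== SOURCE B (Python) =====
-- from typing import Sequence
--
--
-- def _near(phrase: str, other: str) -> bool:
--     if phrase in other or other in phrase:
--         return True
--     pt, ot = set(phrase.split()), set(other.split())
--     union = pt | ot
--     return bool(union) and len(pt & ot) / len(union) >= 0.8
--
--
-- def combine_topic_rows(
--     entity_rows: Sequence[dict],
--     phrase_rows: Sequence[dict],
--     curated_rows: Sequence[dict],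
--     max_topics: int,
-- ) -> list[dict]:
--     if max_topics <= 0:
--         return []
--     budget = min(max_topics // 2, 12)
--     content = [r for r in curated_rows if r.get("kind") != "style"]
--     style = [r for r in curated_rows if r.get("kind") == "style"]
--     remaining = [*entity_rows[:budget], *content, *phrase_rows, *style, *entity_rows[budget:]]
--     kept: list[dict] = []
--     # sieve: keep the head, discard everything pairwise-near it, repeat
--     while remaining:
--         head = remaining[0]
--         kept.append(head)
--         t = head["topic"]
--         remaining = [r for r in remaining[1:] if not _near(r["topic"], t)]
--     return kept[:max_topics]
-- ===== Notes on version B (the rewrite author's own statement) =====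
-- stated objective: alternative
-- what changed: B replaces A's online greedy (five guarded capped passes each testing the candidate against the growing chosen-topics list) by an early-out for a nonpositive cap plus a sieve: it chains the sources once, then repeatedly keeps the head row and FILTERS out of the remainder every row pairwise-near it (no chosen list, no per-block cap logic), applying the cap only as a final slice; correct because A's redundancy test is an existential over a pairwise relation.
import Mathlib
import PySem

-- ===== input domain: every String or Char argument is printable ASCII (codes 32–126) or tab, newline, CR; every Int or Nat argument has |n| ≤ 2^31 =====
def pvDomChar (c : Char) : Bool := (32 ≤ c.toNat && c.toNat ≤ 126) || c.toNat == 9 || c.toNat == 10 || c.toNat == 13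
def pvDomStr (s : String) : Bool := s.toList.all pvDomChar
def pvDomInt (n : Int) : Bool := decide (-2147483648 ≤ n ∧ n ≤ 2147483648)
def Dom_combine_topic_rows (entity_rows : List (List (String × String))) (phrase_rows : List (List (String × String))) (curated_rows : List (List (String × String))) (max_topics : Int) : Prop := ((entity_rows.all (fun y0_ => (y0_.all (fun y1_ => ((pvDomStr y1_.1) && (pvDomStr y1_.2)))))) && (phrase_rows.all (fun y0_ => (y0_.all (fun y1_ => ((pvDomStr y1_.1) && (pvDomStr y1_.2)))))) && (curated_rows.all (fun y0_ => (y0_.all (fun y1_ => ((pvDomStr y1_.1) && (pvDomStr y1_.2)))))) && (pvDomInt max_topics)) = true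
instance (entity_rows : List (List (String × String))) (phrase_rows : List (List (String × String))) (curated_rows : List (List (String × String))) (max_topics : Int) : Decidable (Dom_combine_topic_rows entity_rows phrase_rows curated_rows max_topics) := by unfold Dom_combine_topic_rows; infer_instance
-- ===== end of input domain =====

-- B replaces A's online greedy (capped passes against a growing chosen-topics list) by a sieve that
-- keeps each head row and filters out all rows pairwise-near it, slicing to the cap only at the end
-- (objective: alternative); return values proved equal on Pre_ (nonnegative cap, rows carrying "topic").

-- ===== PORT A =====
-- row["topic"]: total via getD "", exact under Pre_ (every row contains the key "topic")
def pvTopicA (row : List (String × String)) : String :=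
  ((PySem.Dict.mk row).get? "topic").getD ""

-- _is_redundant_phrase: the for/early-return-True loop is List.any of the same disjunction;
-- 'len(p&o)/len(u) >= 0.8' is ported as the exact rational comparison 4*|u| ≤ 5*|p&o|
def pvRedundantA (phrase : String) (chosen : List String) : Bool :=
  let phrase_tokens : PySem.Set String := PySem.Set.ofList (PySem.Str.split₀ phrase)
  chosen.any (fun other =>
    (phrase == other) || PySem.Str.isIn phrase other || PySem.Str.isIn other phrase ||
    (let other_tokens : PySem.Set String := PySem.Set.ofList (PySem.Str.split₀ other)
     let union := PySem.Set.union phrase_tokens other_tokens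
     decide (union ≠ []) &&
       decide (4 * (PySem.Set.len union) ≤ 5 * (PySem.Set.len (PySem.Set.inter phrase_tokens other_tokens)))))

-- one of A's three identical capped loops: append, then break once len(combined) >= max_topics
def pvSegA (mt : Int) :
    List (List (String × String)) →
    (List (List (String × String)) × List String) → (List (List (String × String)) × List String)
  | [], st => st
  | row :: rest, (combined, chosen) =>
    if pvRedundantA (pvTopicA row) chosen then pvSegA mt rest (combined, chosen)
    else
      let combined' := combined ++ [row]
      let chosen' := chosen ++ [pvTopicA row]
      if mt ≤ (combined'.length : Int) then (combined', chosen')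
      else pvSegA mt rest (combined', chosen')

def combine_topic_rows (entity_rows : List (List (String × String))) (phrase_rows : List (List (String × String))) (curated_rows : List (List (String × String))) (max_topics : Int) : List (List (String × String)) :=
  let entity_budget := min (PySem.Int.floordiv max_topics 2) 12
  -- first loop: entity_rows[:entity_budget], no break
  let st1 := (PySem.List.slice entity_rows none (some entity_budget)).foldl
    (fun (st : List (List (String × String)) × List String) row =>
      if pvRedundantA (pvTopicA row) st.2 then st
      else (st.1 ++ [row], st.2 ++ [pvTopicA row])) ([], [])
  let curated_content_rows := curated_rows.filter (fun row => !(((PySem.Dict.mk row).get? "kind") == some "style"))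
  let curated_style_rows := curated_rows.filter (fun row => ((PySem.Dict.mk row).get? "kind") == some "style")
  let st2 := if (st1.1.length : Int) < max_topics then pvSegA max_topics curated_content_rows st1 else st1
  let st3 := if (st2.1.length : Int) < max_topics then pvSegA max_topics phrase_rows st2 else st2
  let st4 := if (st3.1.length : Int) < max_topics then pvSegA max_topics curated_style_rows st3 else st3
  let st5 := if (st4.1.length : Int) < max_topics then pvSegA max_topics (PySem.List.slice entity_rows (some entity_budget) none) st4 else st4
  PySem.List.slice st5.1 none (some max_topics)

-- ===== PORT B =====
def pvTopicB (row : List (String × String)) : String :=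
  ((PySem.Dict.mk row).get? "topic").getD ""

-- B's pairwise helper _near; 0.8 ported as the exact rational comparison
def pvNear (phrase other : String) : Bool :=
  PySem.Str.isIn phrase other || PySem.Str.isIn other phrase ||
  (let pt : PySem.Set String := PySem.Set.ofList (PySem.Str.split₀ phrase)
   let ot : PySem.Set String := PySem.Set.ofList (PySem.Str.split₀ other)
   let union := PySem.Set.union pt ot
   decide (union ≠ []) &&
     decide (4 * (PySem.Set.len union) ≤ 5 * (PySem.Set.len (PySem.Set.inter pt ot))))

-- B's while loop: keep the head, filter out of the remainder every row pairwise-near it, repeat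
def pvSieve : List (List (String × String)) → List (List (String × String))
  | [] => []
  | h :: rest => h :: pvSieve (rest.filter (fun r => !pvNear (pvTopicB r) (pvTopicB h)))
termination_by l => l.length
decreasing_by
  simp only [List.length_cons, List.length_unattach, Nat.lt_succ_iff]
  exact le_trans (List.length_filter_le _ _) (le_of_eq (List.length_attach))

def combine_topic_rows_alt (entity_rows : List (List (String × String))) (phrase_rows : List (List (String × String))) (curated_rows : List (List (String × String))) (max_topics : Int) : List (List (String × String)) :=
  if max_topics ≤ 0 then []
  else
  let budget := min (PySem.Int.floordiv max_topics 2) 12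
  let content := curated_rows.filter (fun row => !(((PySem.Dict.mk row).get? "kind") == some "style"))
  let style := curated_rows.filter (fun row => ((PySem.Dict.mk row).get? "kind") == some "style")
  let remaining := PySem.List.slice entity_rows none (some budget) ++ content ++ phrase_rows ++ style ++
      PySem.List.slice entity_rows (some budget) none
  PySem.List.slice (pvSieve remaining) none (some max_topics)

-- ===== PRECONDITION & SPEC =====
-- Pre_ admits: a POSITIVE cap with every row carrying "topic" (A raises KeyError on any reached
-- topicless row, and B's sieve — which does not stop at the cap — itself raises on topicless rows
-- past A's break point); a ZERO cap (A returns [] touching no row); and a NEGATIVE cap whose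
-- negative prefix slice (all its rows topic-carrying) is no longer than the trailing cut, so A
-- returns [].  Excluded: negative caps keeping more rows than the trailing cut removes, where A's
-- value is an accident of Python's negative-slice arithmetic and B naturally returns [], and
-- topicless-row inputs where one of the programs raises KeyError.
def Pre_combine_topic_rows (entity_rows : List (List (String × String))) (phrase_rows : List (List (String × String))) (curated_rows : List (List (String × String))) (max_topics : Int) : Prop :=
  (0 < max_topics ∧
    ∀ row ∈ entity_rows ++ phrase_rows ++ curated_rows, (PySem.Dict.mk row).contains "topic" = true) ∨
  max_topics = 0 ∨
  (max_topics < 0 ∧ (entity_rows.length : Int) + PySem.Int.floordiv max_topics 2 + max_topics ≤ 0 ∧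
    ∀ row ∈ entity_rows.take (((entity_rows.length : Int) + PySem.Int.floordiv max_topics 2).toNat),
      (PySem.Dict.mk row).contains "topic" = true)
instance (entity_rows : List (List (String × String))) (phrase_rows : List (List (String × String))) (curated_rows : List (List (String × String))) (max_topics : Int) : Decidable (Pre_combine_topic_rows entity_rows phrase_rows curated_rows max_topics) := by unfold Pre_combine_topic_rows; infer_instance

def pvWitness_combine_topic_rows : (List (List (String × String))) × (List (List (String × String))) × (List (List (String × String))) × Int :=
  ([[("topic", "alpha")]], [[("topic", "beta")]], [[("topic", "gamma"), ("kind", "style")]], 3)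

def Spec_combine_topic_rows (entity_rows : List (List (String × String))) (phrase_rows : List (List (String × String))) (curated_rows : List (List (String × String))) (max_topics : Int) (out : List (List (String × String))) : Prop := out = combine_topic_rows_alt entity_rows phrase_rows curated_rows max_topics
instance (entity_rows : List (List (String × String))) (phrase_rows : List (List (String × String))) (curated_rows : List (List (String × String))) (max_topics : Int) (out : List (List (String × String))) : Decidable (Spec_combine_topic_rows entity_rows phrase_rows curated_rows max_topics out) := by unfold Spec_combine_topic_rows; infer_instance

-- ===== CLAIM (what is proved, stated in full; the proofs are below) =====
def Claim_equal_combine_topic_rows : Prop := ∀ (entity_rows : List (List (String × String))) (phrase_rows : List (List (String × String))) (curated_rows : List (List (String × String))) (max_topics : Int), Dom_combine_topic_rows entity_rows phrase_rows curated_rows max_topics → Pre_combine_topic_rows entity_rows phrase_rows curated_rows max_topics → Spec_combine_topic_rows entity_rows phrase_rows curated_rows max_topics (combine_topic_rows entity_rows phrase_rows curated_rows max_topics)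

-- ===== LEMMAS AND PROOFS =====

-- proof-side online greedy with explicit cap: the common denominator of both programs
def pvRedB (phrase : String) (chosen : List String) : Bool :=
  chosen.any (fun other => pvNear phrase other)

def pvPick (mt : Int) :
    List (List (String × String)) →
    (List (List (String × String)) × List String) → (List (List (String × String)) × List String)
  | [], st => st
  | row :: rest, (combined, chosen) =>
    if mt ≤ (combined.length : Int) then (combined, chosen)
    else if pvRedB (pvTopicA row) chosen then pvPick mt rest (combined, chosen)
    else pvPick mt rest (combined ++ [row], chosen ++ [pvTopicA row])

-- proof-side uncapped greedy
def pvGreedy : List (List (String × String)) → List String → List (List (String × String))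
  | [], _ => []
  | row :: rest, chosen =>
    if pvRedB (pvTopicA row) chosen then pvGreedy rest chosen
    else row :: pvGreedy rest (chosen ++ [pvTopicA row])

theorem pvTopic_eq : pvTopicB = pvTopicA := rfl

theorem pvSieve_nil : pvSieve [] = [] := by rw [pvSieve.eq_def]

theorem pvSieve_cons (h : List (String × String)) (rest : List (List (String × String))) :
    pvSieve (h :: rest) = h :: pvSieve (rest.filter (fun r => !pvNear (pvTopicB r) (pvTopicB h))) := by
  rw [pvSieve.eq_def]

-- A's equality test is subsumed by substring containment (s in s is always True)
theorem pvRedundant_eq (phrase : String) (chosen : List String) :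
    pvRedundantA phrase chosen = pvRedB phrase chosen := by
  induction chosen with
  | nil => rfl
  | cons other rest ih =>
    unfold pvRedundantA pvRedB at ih ⊢
    unfold pvNear
    simp only [List.any_cons, ih]
    congr 1
    by_cases h : phrase = other
    · subst h
      have hself : PySem.Chars.isIn phrase.toList phrase.toList = true :=
        (PySem.Chars.isIn_iff_infix _ _).mpr (List.infix_refl _)
      simp [hself]
    · simp [h, Bool.or_assoc]

theorem pvPick_full (mt : Int) (l : List (List (String × String)))
    (c : List (List (String × String))) (ch : List String) (h : mt ≤ (c.length : Int)) :
    pvPick mt l (c, ch) = (c, ch) := by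
  cases l with
  | nil => rfl
  | cons r rest => simp [pvPick, h]

theorem pvPick_len (mt : Int) (l : List (List (String × String)))
    (st : List (List (String × String)) × List String) (h : (st.1.length : Int) ≤ mt) :
    ((pvPick mt l st).1.length : Int) ≤ mt := by
  induction l generalizing st with
  | nil => obtain ⟨c, ch⟩ := st; simpa [pvPick] using h
  | cons r rest ih =>
    obtain ⟨c, ch⟩ := st
    by_cases hf : mt ≤ (c.length : Int)
    · simpa [pvPick, hf] using h
    · simp only [pvPick, if_neg hf]
      split
      · exact ih (c, ch) h
      · exact ih (c ++ [r], ch ++ [pvTopicA r]) (by simp at h ⊢; omega)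

theorem pvPick_append (mt : Int) (l1 l2 : List (List (String × String)))
    (st : List (List (String × String)) × List String) :
    pvPick mt (l1 ++ l2) st = pvPick mt l2 (pvPick mt l1 st) := by
  induction l1 generalizing st with
  | nil => simp [pvPick]
  | cons r rest ih =>
    obtain ⟨c, ch⟩ := st
    by_cases hf : mt ≤ (c.length : Int)
    · rw [List.cons_append]
      simp only [pvPick, if_pos hf]
      exact (pvPick_full mt l2 c ch hf).symm
    · simp only [List.cons_append, pvPick, if_neg hf]
      split
      · exact ih (c, ch)
      · exact ih (c ++ [r], ch ++ [pvTopicA r])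

-- A's break-after-append capped loop computes the same state as the break-before loop,
-- started strictly below the cap
theorem pvSegA_eq_pick (mt : Int) (l : List (List (String × String)))
    (c : List (List (String × String))) (ch : List String) (h : (c.length : Int) < mt) :
    pvSegA mt l (c, ch) = pvPick mt l (c, ch) := by
  induction l generalizing c ch with
  | nil => rfl
  | cons r rest ih =>
    have hf : ¬ mt ≤ (c.length : Int) := by omega
    simp only [pvSegA, pvPick, if_neg hf, pvRedundant_eq]
    split
    · exact ih c ch h
    · by_cases hcap : mt ≤ ((c ++ [r]).length : Int)
      · rw [if_pos (by simpa using hcap)]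
        exact (pvPick_full mt rest _ _ (by simpa using hcap)).symm
      · rw [if_neg (by simpa using hcap)]
        exact ih _ _ (by simp at hcap ⊢; omega)

-- A's uncapped first loop never reaches the cap when the segment fits under it
theorem pvFoldl_eq_pick (mt : Int) (l : List (List (String × String)))
    (c : List (List (String × String))) (ch : List String)
    (h : (c.length : Int) + l.length ≤ mt) :
    l.foldl (fun (st : List (List (String × String)) × List String) row =>
        if pvRedundantA (pvTopicA row) st.2 then st
        else (st.1 ++ [row], st.2 ++ [pvTopicA row])) (c, ch)
      = pvPick mt l (c, ch) := by
  induction l generalizing c ch with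
  | nil => rfl
  | cons r rest ih =>
    have hf : ¬ mt ≤ (c.length : Int) := by simp at h; omega
    have hstep : pvPick mt (r :: rest) (c, ch)
        = if pvRedB (pvTopicA r) ch = true then pvPick mt rest (c, ch)
          else pvPick mt rest (c ++ [r], ch ++ [pvTopicA r]) := by
      simp only [pvPick, if_neg hf]
    rw [List.foldl_cons, hstep]
    dsimp only
    rw [pvRedundant_eq]
    by_cases hr : pvRedB (pvTopicA r) ch = true
    · rw [if_pos hr, if_pos hr]
      exact ih c ch (by simp at h ⊢; omega)
    · rw [if_neg hr, if_neg hr]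
      exact ih (c ++ [r]) (ch ++ [pvTopicA r]) (by simp at h ⊢; omega)

-- A's 'if len(combined) < max_topics' guard around a capped loop is exactly one pvPick pass
theorem pvGuard_eq_pick (mt : Int) (l : List (List (String × String)))
    (st : List (List (String × String)) × List String) (h : (st.1.length : Int) ≤ mt) :
    (if (st.1.length : Int) < mt then pvSegA mt l st else st) = pvPick mt l st := by
  obtain ⟨c, ch⟩ := st
  by_cases hlt : (c.length : Int) < mt
  · rw [if_pos hlt]; exact pvSegA_eq_pick mt l c ch hlt
  · rw [if_neg hlt]
    exact (pvPick_full mt l c ch (by simp at h ⊢; omega)).symm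

-- the capped greedy is the truncated uncapped greedy
theorem pvPick_eq_take (mt : Int) (l : List (List (String × String)))
    (c : List (List (String × String))) (ch : List String) (h : (c.length : Int) ≤ mt) :
    (pvPick mt l (c, ch)).1 = c ++ (pvGreedy l ch).take (mt - c.length).toNat := by
  induction l generalizing c ch with
  | nil => simp [pvPick, pvGreedy]
  | cons r rest ih =>
    by_cases hf : mt ≤ (c.length : Int)
    · have h0 : (mt - c.length).toNat = 0 := by omega
      simp [pvPick, if_pos hf, h0]
    · simp only [pvPick, if_neg hf, pvGreedy]
      by_cases hr : pvRedB (pvTopicA r) ch = true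
      · rw [if_pos hr, if_pos hr]; exact ih c ch h
      · rw [if_neg hr, if_neg hr]
        rw [ih (c ++ [r]) (ch ++ [pvTopicA r]) (by simp; omega)]
        have hn : (mt - c.length).toNat = (mt - (c ++ [r]).length).toNat + 1 := by
          simp; omega
        rw [hn, List.take_succ_cons]
        simp

-- the uncapped greedy is the sieve of the rows not already redundant with the accumulator:
-- valid because pvRedB is an existential over the pairwise pvNear
theorem pvGreedy_eq_sieve (l : List (List (String × String))) (ch : List String) :
    pvGreedy l ch = pvSieve (l.filter (fun r => !pvRedB (pvTopicA r) ch)) := by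
  induction l generalizing ch with
  | nil => simp [pvGreedy, pvSieve_nil]
  | cons r rest ih =>
    by_cases hr : pvRedB (pvTopicA r) ch = true
    · simp only [pvGreedy, List.filter_cons, hr, Bool.not_true]
      exact ih ch
    · simp only [pvGreedy, if_neg hr, List.filter_cons, (by simp [hr] : (!pvRedB (pvTopicA r) ch) = true)]
      rw [if_pos trivial, pvSieve_cons, List.filter_filter]
      congr 1
      rw [ih (ch ++ [pvTopicA r])]
      congr 1
      apply List.filter_congr
      intro a _
      simp [pvRedB, List.any_append, pvTopic_eq, Bool.and_comm]

-- A equals the truncated sieve for every nonnegative cap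
theorem pvA_eq_take_sieve (entity_rows phrase_rows curated_rows : List (List (String × String)))
    (mt : Int) (hmt : 0 ≤ mt) :
    combine_topic_rows entity_rows phrase_rows curated_rows mt
      = (pvSieve (PySem.List.slice entity_rows none (some (min (PySem.Int.floordiv mt 2) 12)) ++
          curated_rows.filter (fun row => !(((PySem.Dict.mk row).get? "kind") == some "style")) ++
          phrase_rows ++
          curated_rows.filter (fun row => ((PySem.Dict.mk row).get? "kind") == some "style") ++
          PySem.List.slice entity_rows (some (min (PySem.Int.floordiv mt 2) 12)) none)).take mt.toNat := by
  unfold combine_topic_rows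
  dsimp only
  set budget := min (PySem.Int.floordiv mt 2) 12 with hb
  have hb0 : 0 ≤ budget := by
    have := PySem.Int.floordiv_eq_ediv_of_pos (a := mt) (b := 2) (by omega)
    simp only [hb, le_min_iff, this]; omega
  have hbmt : budget ≤ mt := by
    have := PySem.Int.floordiv_eq_ediv_of_pos (a := mt) (b := 2) (by omega)
    simp only [hb, min_le_iff, this]; left; omega
  set seg1 := PySem.List.slice entity_rows none (some budget) with hseg1
  have hlen1 : (seg1.length : Int) ≤ mt := by
    rw [hseg1, PySem.List.slice_to _ hb0]
    calc ((entity_rows.take budget.toNat).length : Int)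
        ≤ (budget.toNat : Int) := by exact_mod_cast List.length_take_le budget.toNat entity_rows
      _ ≤ mt := by omega
  set content := curated_rows.filter (fun row => !(((PySem.Dict.mk row).get? "kind") == some "style")) with hcontent
  set style := curated_rows.filter (fun row => ((PySem.Dict.mk row).get? "kind") == some "style") with hstyle
  set rest := PySem.List.slice entity_rows (some budget) none with hrest
  rw [pvFoldl_eq_pick mt seg1 [] [] (by simpa using hlen1)]
  have l1 : ((pvPick mt seg1 ([], [])).1.length : Int) ≤ mt :=
    pvPick_len mt seg1 ([], []) (by simp; omega)
  rw [pvGuard_eq_pick mt content _ l1]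
  have l2 := pvPick_len mt content _ l1
  rw [pvGuard_eq_pick mt phrase_rows _ l2]
  have l3 := pvPick_len mt phrase_rows _ l2
  rw [pvGuard_eq_pick mt style _ l3]
  have l4 := pvPick_len mt style _ l3
  rw [pvGuard_eq_pick mt rest _ l4]
  rw [PySem.List.slice_to _ hmt]
  rw [show (pvPick mt rest (pvPick mt style (pvPick mt phrase_rows (pvPick mt content (pvPick mt seg1 ([], []))))))
      = pvPick mt (seg1 ++ content ++ phrase_rows ++ style ++ rest) ([], []) by
    rw [pvPick_append, pvPick_append, pvPick_append, pvPick_append]]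
  rw [pvPick_eq_take mt _ [] [] (by simp; omega)]
  rw [pvGreedy_eq_sieve]
  simp [pvRedB]

-- A's first loop grows the kept list by at most one per row
theorem pvFoldl_len (l : List (List (String × String)))
    (c : List (List (String × String))) (ch : List String) :
    ((l.foldl (fun (st : List (List (String × String)) × List String) row =>
        if pvRedundantA (pvTopicA row) st.2 then st
        else (st.1 ++ [row], st.2 ++ [pvTopicA row])) (c, ch)).1).length ≤ c.length + l.length := by
  induction l generalizing c ch with
  | nil => simp
  | cons r rest ih =>
    rw [List.foldl_cons]
    dsimp only
    by_cases hr : pvRedundantA (pvTopicA r) ch = true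
    · rw [if_pos hr]
      have := ih c ch
      simp only [List.length_cons]; omega
    · rw [if_neg hr]
      have := ih (c ++ [r]) (ch ++ [pvTopicA r])
      simp only [List.length_cons, List.length_append, List.length_nil] at this ⊢
      omega

-- A returns [] for a negative cap whose kept prefix cannot outgrow the trailing negative cut
theorem pvA_neg_nil (entity_rows phrase_rows curated_rows : List (List (String × String)))
    (mt : Int) (hmt : mt < 0)
    (hlen : (entity_rows.length : Int) + PySem.Int.floordiv mt 2 + mt ≤ 0) :
    combine_topic_rows entity_rows phrase_rows curated_rows mt = [] := by
  unfold combine_topic_rows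
  dsimp only
  have h2 : PySem.Int.floordiv mt 2 = mt / 2 := PySem.Int.floordiv_eq_ediv_of_pos (by omega)
  have hbud : min (PySem.Int.floordiv mt 2) 12 = PySem.Int.floordiv mt 2 := by
    rw [h2]; exact min_eq_left (by omega)
  rw [hbud, h2]
  set k : Nat := (-(mt / 2)).toNat with hk
  have hkpos : 0 < k := by simp [hk]; omega
  have hbk : mt / 2 = -(k : Int) := by simp [hk]; omega
  rw [hbk, PySem.List.slice_to_neg_natCast _ _ hkpos]
  have hguard : ∀ (xs : List (List (String × String))), ¬ ((xs.length : Int) < mt) :=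
    fun xs => by omega
  rw [if_neg (hguard _), if_neg (hguard _), if_neg (hguard _), if_neg (hguard _)]
  have hst := pvFoldl_len (entity_rows.take (entity_rows.length - k)) [] []
  have hmk : mt = -((((-mt).toNat) : Nat) : Int) := by omega
  rw [hmk, PySem.List.slice_to_neg_natCast _ _ (by omega)]
  rw [h2] at hlen
  have h0 : ((entity_rows.take (entity_rows.length - k)).foldl
      (fun (st : List (List (String × String)) × List String) row =>
        if pvRedundantA (pvTopicA row) st.2 then st
        else (st.1 ++ [row], st.2 ++ [pvTopicA row])) ([], [])).1.length - (-mt).toNat = 0 := by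
    have h1 : ((entity_rows.take (entity_rows.length - k)).foldl
        (fun (st : List (List (String × String)) × List String) row =>
          if pvRedundantA (pvTopicA row) st.2 then st
          else (st.1 ++ [row], st.2 ++ [pvTopicA row])) ([], [])).1.length
        ≤ (entity_rows.take (entity_rows.length - k)).length := by simpa using hst
    have h3 : (entity_rows.take (entity_rows.length - k)).length ≤ entity_rows.length - k := by
      simp [List.length_take]
    have hk2 : (k : Int) = -(mt / 2) := by simp [hk]; omega
    omega
  rw [h0, List.take_zero]

-- ===== VERDICT (by name: the statement is the Claim_ definition above) =====
theorem combine_topic_rows_spec : Claim_equal_combine_topic_rows := by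
  intro entity_rows phrase_rows curated_rows max_topics _hDom hPre
  unfold Spec_combine_topic_rows combine_topic_rows_alt
  rcases hPre with ⟨hmt, -⟩ | hmt | ⟨hmt, hlen⟩
  · rw [if_neg (by omega)]
    dsimp only
    rw [PySem.List.slice_to _ (by omega), pvA_eq_take_sieve _ _ _ _ (by omega)]
  · rw [if_pos (by omega)]
    rw [pvA_eq_take_sieve _ _ _ _ (by omega)]
    simp [hmt]
  · obtain ⟨hlen, -⟩ := hlen
    rw [if_pos (by omega)]
    exact pvA_neg_nil _ _ _ _ hmt hlen
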